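-- pv_equiv track=rewrite | github.com/JinMinji/Algorithm_questions | Python/KaKao2021SummerInternship_01.py | solution
-- ===== SOURCE A (Python) =====
-- def solution(s):
--     int_list = ['0', '1', '2', '3', '4', '5', '6', '7', '8', '9']
--     answer_string = ''
--     for i in range(len(s)):
--         if s[i] in int_list:
--             answer_string += s[i]
--         elif s[i:i + 4] == 'zero':
--             answer_string += '0'
--         elif s[i:i + 3] == 'one':
--             answer_string += '1'
--         elif s[i:i + 3] == 'two':
--             answer_string += '2'
--         elif s[i:i + 5] == 'three':
--             answer_string += '3'
--         elif s[i:i + 4] == 'four':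
--             answer_string += '4'
--         elif s[i:i + 4] == 'five':
--             answer_string += '5'
--         elif s[i:i + 3] == 'six':
--             answer_string += '6'
--         elif s[i:i + 5] == 'seven':
--             answer_string += '7'
--         elif s[i:i + 5] == 'eight':
--             answer_string += '8'
--         elif s[i:i + 4] == 'nine':
--             answer_string += '9'
--
--     answer = int(answer_string)
--     return answer
-- ===== SOURCE B (Python) =====
-- WORDS = ['zero', 'one', 'two', 'three', 'four', 'five',
--          'six', 'seven', 'eight', 'nine']
--
--
-- def solution(s):
--     # Event-list approach: collect (position, digit) hits — digit characters
--     # via one enumerate pass, word occurrences via str.find per word — then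
--     # sort the hits by position and join.  The ten words are pairwise
--     # non-prefix and start with non-digit letters, so positions are unique.
--     hits = [(i, c) for i, c in enumerate(s) if '0' <= c <= '9']
--     for d, w in enumerate(WORDS):
--         j = s.find(w)
--         while j != -1:
--             hits.append((j, str(d)))
--             j = s.find(w, j + 1)
--     hits.sort(key=lambda t: t[0])
--     return int(''.join(c for _, c in hits))
-- ===== Notes on version B (the rewrite author's own statement) =====
-- stated objective: alternative
-- what changed: Replaces A's single index scan with a ten-branch elif chain of slice comparisons by an event-list algorithm: digit characters are collected in one enumerate pass, each number word's occurrence positions are found by a repeated str.find loop (substring search, no per-position slice tests), the (position, digit) hits are sorted by position and joined; correct because the ten words are pairwise non-prefix and digit-free, so each position carries at most one hit.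
-- outside the precondition, e.g. on solution('xy'): A raises ValueError, B raises ValueError
import Mathlib
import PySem

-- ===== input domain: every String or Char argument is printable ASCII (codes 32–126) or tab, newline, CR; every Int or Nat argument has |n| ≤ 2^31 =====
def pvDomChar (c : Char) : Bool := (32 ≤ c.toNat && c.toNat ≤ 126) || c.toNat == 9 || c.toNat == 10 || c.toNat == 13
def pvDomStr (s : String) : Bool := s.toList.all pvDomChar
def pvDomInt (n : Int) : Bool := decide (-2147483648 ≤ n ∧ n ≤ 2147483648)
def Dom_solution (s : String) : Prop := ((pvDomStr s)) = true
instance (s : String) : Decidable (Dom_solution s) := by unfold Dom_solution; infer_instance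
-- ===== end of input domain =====

-- B replaces A's per-position ten-branch elif chain of slice comparisons by an event list:
-- digit characters from one enumerate pass, word occurrences from a repeated str.find loop per
-- word, then a sort by position and a join — an alternative algorithm, not claimed faster.

-- ===== PORT A =====
def solution (s : String) : Int :=
  let cs := s.toList
  let intList : List Char := ['0', '1', '2', '3', '4', '5', '6', '7', '8', '9']
  let answer : List Char :=
    (PySem.List.pyRange 0 (PySem.List.len cs) 1).foldl (fun acc i =>
      match PySem.List.pyGet? cs i with
      | none => acc  -- unreachable: i ∈ range(len(s))
      | some c =>
        if c ∈ intList then acc ++ [c]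
        else if PySem.List.slice cs (some i) (some (i + 4)) = "zero".toList then acc ++ ['0']
        else if PySem.List.slice cs (some i) (some (i + 3)) = "one".toList then acc ++ ['1']
        else if PySem.List.slice cs (some i) (some (i + 3)) = "two".toList then acc ++ ['2']
        else if PySem.List.slice cs (some i) (some (i + 5)) = "three".toList then acc ++ ['3']
        else if PySem.List.slice cs (some i) (some (i + 4)) = "four".toList then acc ++ ['4']
        else if PySem.List.slice cs (some i) (some (i + 4)) = "five".toList then acc ++ ['5']
        else if PySem.List.slice cs (some i) (some (i + 3)) = "six".toList then acc ++ ['6']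
        else if PySem.List.slice cs (some i) (some (i + 5)) = "seven".toList then acc ++ ['7']
        else if PySem.List.slice cs (some i) (some (i + 5)) = "eight".toList then acc ++ ['8']
        else if PySem.List.slice cs (some i) (some (i + 4)) = "nine".toList then acc ++ ['9']
        else acc) []
  (PySem.Int.ofChars? answer).getD 0

-- ===== PORT B =====
-- the module-level WORDS list of Source B
def pvWordsB : List (List Char) :=
  ["zero".toList, "one".toList, "two".toList, "three".toList, "four".toList,
   "five".toList, "six".toList, "seven".toList, "eight".toList, "nine".toList]

-- 'j = s.find(w); while j != -1: hits.append((j, str(d))); j = s.find(w, j + 1)'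
-- (fuel = len(s)+1 bounds the iterations: each one consumes a distinct match position)
def pvFindLoop (cs w dstr : List Char) : Nat → Int → List (Int × List Char) → List (Int × List Char)
  | 0, _, acc => acc
  | fuel + 1, j, acc =>
    if j = -1 then acc
    else pvFindLoop cs w dstr fuel (PySem.Chars.findFrom cs w (j + 1)) (acc ++ [(j, dstr)])

def solution_alt (s : String) : Int :=
  let cs := s.toList
  -- hits = [(i, c) for i, c in enumerate(s) if '0' <= c <= '9']
  let hits0 : List (Int × List Char) :=
    (PySem.List.enumerate cs 0).foldl
      (fun h p => if '0' ≤ p.2 ∧ p.2 ≤ '9' then h ++ [(p.1, [p.2])] else h) []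
  -- for d, w in enumerate(WORDS): find loop
  let hits : List (Int × List Char) :=
    (PySem.List.enumerate pvWordsB 0).foldl
      (fun h dw => pvFindLoop cs dw.2 (PySem.Int.toChars dw.1) (cs.length + 1)
        (PySem.Chars.find cs dw.2) h) hits0
  -- hits.sort(key=lambda t: t[0])
  let sortedHits := PySem.List.sorted hits (fun t => t.1)
  -- int(''.join(c for _, c in hits))
  let answer := sortedHits.foldl (fun acc t => acc ++ t.2) []
  (PySem.Int.ofChars? answer).getD 0

-- ===== PRECONDITION & SPEC =====
-- Pre_ excludes exactly the strings with no digit character and no occurrence of a number word: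
-- there A's int('') raises ValueError (and B raises the same way).
def Pre_solution (s : String) : Prop :=
  s.toList.any (fun c => '0' ≤ c ∧ c ≤ '9') = true
    ∨ pvWordsB.any (fun w => PySem.Chars.isIn w s.toList) = true
instance (s : String) : Decidable (Pre_solution s) := by unfold Pre_solution; infer_instance
def pvWitness_solution : String := "5"
def Spec_solution (s : String) (out : Int) : Prop := out = solution_alt s
instance (s : String) (out : Int) : Decidable (Spec_solution s out) := by unfold Spec_solution; infer_instance

-- ===== CLAIM (what is proved, stated in full; the proofs are below) =====
def Claim_equal_solution : Prop := ∀ (s : String), Dom_solution s → Pre_solution s → Spec_solution s (solution s)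

-- ===== LEMMAS AND PROOFS =====

-- A-side word table: (word, digit character) in elif order
def pvWords : List (List Char × List Char) :=
  [("zero".toList, ['0']), ("one".toList, ['1']), ("two".toList, ['2']),
   ("three".toList, ['3']), ("four".toList, ['4']), ("five".toList, ['5']),
   ("six".toList, ['6']), ("seven".toList, ['7']), ("eight".toList, ['8']),
   ("nine".toList, ['9'])]

-- first-match chain over the word table (the shape of A's elif chain)
def pvFchain (cs : List Char) (i : Int) : List (List Char × List Char) → List Char
  | [] => []
  | wd :: t =>
    if PySem.List.slice cs (some i) (some (i + PySem.List.len wd.1)) = wd.1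
    then wd.2 else pvFchain cs i t

-- what both programs emit for position k
def pvEmit (cs : List Char) (k : Nat) : List Char :=
  if h : k < cs.length then
    if '0' ≤ cs[k] ∧ cs[k] ≤ '9' then [cs[k]] else pvFchain cs (k : Int) pvWords
  else []

-- B's digit hits, word-occurrence hits, and the position-ordered hit list
def pvDH (cs : List Char) : List (Int × List Char) :=
  ((PySem.List.enumerate cs 0).filter (fun p => decide ('0' ≤ p.2 ∧ p.2 ≤ '9'))).map
    (fun p => (p.1, [p.2]))

def pvG (cs : List Char) (dw : Int × List Char) : List (Int × List Char) :=
  ((List.range cs.length).filter (fun j => decide (dw.2 <+: cs.drop j))).map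
    (fun (j : Nat) => ((j : Int), PySem.Int.toChars dw.1))

def pvYs (cs : List Char) : List (Int × List Char) :=
  (List.range cs.length).filterMap
    (fun (k : Nat) => if pvEmit cs k = [] then none else some ((k : Int), pvEmit cs k))

-- ---- concrete facts about the word tables (all by computation) ----
theorem pvEnum_ne : ∀ dw ∈ PySem.List.enumerate pvWordsB 0, dw.2 ≠ [] := by decide

theorem pvEnum_head : ∀ dw ∈ PySem.List.enumerate pvWordsB 0,
    ¬('0' ≤ dw.2.headD 'a' ∧ dw.2.headD 'a' ≤ '9') := by decide

theorem pvEnum_map :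
    (PySem.List.enumerate pvWordsB 0).map (fun dw => (dw.2, PySem.Int.toChars dw.1)) = pvWords := by
  decide

theorem pvEnum_pf : (PySem.List.enumerate pvWordsB 0).Pairwise
    (fun p q => ¬(p.2 <+: q.2) ∧ ¬(q.2 <+: p.2)) := by decide

theorem pvEnum_dstr_ne : ∀ dw ∈ PySem.List.enumerate pvWordsB 0,
    PySem.Int.toChars dw.1 ≠ [] := by decide

theorem pvWords_pf : ∀ p ∈ pvWords, ∀ q ∈ pvWords, (p.1 <+: q.1 ∨ q.1 <+: p.1) → p = q := by decide

theorem pvWords_nodup : pvWords.Pairwise (· ≠ ·) := by decide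

-- ---- slices and prefixes ----
-- s[i:i+len(w)] for 0 ≤ i is a take of a drop
theorem pvSlice_eq (cs : List Char) (i : Int) (hi : 0 ≤ i) (w : List Char) :
    PySem.List.slice cs (some i) (some (i + PySem.List.len w))
      = (cs.drop i.toNat).take w.length := by
  rw [PySem.List.slice_toNat cs hi (by simp only [PySem.List.len_eq]; omega)]
  congr 1
  simp only [PySem.List.len_eq]
  omega

-- matching at i in slice form is prefix-of-drop form
theorem pvSlice_match_iff (cs : List Char) (i : Int) (hi : 0 ≤ i) (w : List Char) :
    PySem.List.slice cs (some i) (some (i + PySem.List.len w)) = w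
      ↔ w <+: cs.drop i.toNat := by
  rw [pvSlice_eq cs i hi w]
  exact ⟨fun h => List.prefix_iff_eq_take.mpr h.symm, fun h => (List.prefix_iff_eq_take.mp h).symm⟩

theorem pvMatch_prefix (cs : List Char) (i : Int) (hi : 0 ≤ i) (w1 w2 : List Char)
    (h1 : PySem.List.slice cs (some i) (some (i + PySem.List.len w1)) = w1)
    (h2 : PySem.List.slice cs (some i) (some (i + PySem.List.len w2)) = w2) :
    w1 <+: w2 ∨ w2 <+: w1 := by
  rw [pvSlice_eq cs i hi w1] at h1
  rw [pvSlice_eq cs i hi w2] at h2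
  exact List.prefix_or_prefix_of_prefix (h1 ▸ List.take_prefix _ _) (h2 ▸ List.take_prefix _ _)

-- a nonempty word matching as a prefix of cs.drop j starts with cs[j], and j is in range
theorem pvPrefix_head (cs w : List Char) (j : Nat) (hw : w ≠ []) (hp : w <+: cs.drop j) :
    j < cs.length ∧ cs[j]? = w.head? := by
  obtain ⟨t, ht⟩ := hp
  have hne : cs.drop j ≠ [] := by rw [← ht]; simp [hw]
  have hlt : j < cs.length := by
    by_contra hge
    exact hne (List.drop_eq_nil_iff.mpr (by omega))
  have hh : (cs.drop j).head? = w.head? := by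
    rw [← ht]; exact List.head?_append_of_ne_nil w hw
  exact ⟨hlt, by rw [← List.head?_drop, hh]⟩

-- at any position, the ten words are mutually exclusive matchers
theorem pvPairwise_at (cs : List Char) (i : Int) (hi : 0 ≤ i) :
    pvWords.Pairwise (fun p q =>
      ¬(PySem.List.slice cs (some i) (some (i + PySem.List.len p.1)) = p.1
        ∧ PySem.List.slice cs (some i) (some (i + PySem.List.len q.1)) = q.1)) := by
  refine List.Pairwise.imp_of_mem ?_ pvWords_nodup
  rintro p q hp hq hne ⟨h1, h2⟩
  exact hne (pvWords_pf p hp q hq (pvMatch_prefix cs i hi p.1 q.1 h1 h2))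

-- ---- the first-match chain ----
theorem pvFchain_eq_of_match (cs : List Char) (i : Int) (W : List (List Char × List Char))
    (hpw : W.Pairwise (fun p q =>
      ¬(PySem.List.slice cs (some i) (some (i + PySem.List.len p.1)) = p.1
        ∧ PySem.List.slice cs (some i) (some (i + PySem.List.len q.1)) = q.1)))
    (wd : List Char × List Char) (hwd : wd ∈ W)
    (hm : PySem.List.slice cs (some i) (some (i + PySem.List.len wd.1)) = wd.1) :
    pvFchain cs i W = wd.2 := by
  induction W with
  | nil => cases hwd
  | cons a t ih =>
    obtain ⟨hhead, htail⟩ := List.pairwise_cons.mp hpw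
    rcases List.mem_cons.mp hwd with rfl | hmem
    · rw [pvFchain, if_pos hm]
    · rw [pvFchain]
      by_cases ha : PySem.List.slice cs (some i) (some (i + PySem.List.len a.1)) = a.1
      · exact absurd ⟨ha, hm⟩ (hhead wd hmem)
      · rw [if_neg ha]; exact ih htail hmem

theorem pvFchain_ne_nil_exists (cs : List Char) (i : Int) (W : List (List Char × List Char))
    (h : pvFchain cs i W ≠ []) :
    ∃ wd ∈ W, PySem.List.slice cs (some i) (some (i + PySem.List.len wd.1)) = wd.1
      ∧ pvFchain cs i W = wd.2 := by
  induction W with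
  | nil => exact absurd rfl h
  | cons a t ih =>
    rw [pvFchain] at h ⊢
    by_cases ha : PySem.List.slice cs (some i) (some (i + PySem.List.len a.1)) = a.1
    · exact ⟨a, List.mem_cons_self, ha, by rw [if_pos ha]⟩
    · rw [if_neg ha] at h ⊢
      obtain ⟨wd, hwd, hm, he⟩ := ih h
      exact ⟨wd, List.mem_cons_of_mem _ hwd, hm, he⟩

-- membership in A's int_list is the digit-range test
theorem pvMem_intList (c : Char) :
    c ∈ (['0', '1', '2', '3', '4', '5', '6', '7', '8', '9'] : List Char)
      ↔ ('0' ≤ c ∧ c ≤ '9') := by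
  constructor
  · intro h; fin_cases h <;> decide
  · rintro ⟨h1, h2⟩
    rw [Char.le_def] at h1 h2
    have hb : 48 ≤ c.toNat ∧ c.toNat ≤ 57 := ⟨h1, h2⟩
    have : c.toNat = 48 ∨ c.toNat = 49 ∨ c.toNat = 50 ∨ c.toNat = 51 ∨ c.toNat = 52 ∨
        c.toNat = 53 ∨ c.toNat = 54 ∨ c.toNat = 55 ∨ c.toNat = 56 ∨ c.toNat = 57 := by omega
    have hc : ∀ n : Nat, c.toNat = n → c = Char.ofNat n := by
      intro n hn; rw [← hn, Char.ofNat_toNat]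
    rcases this with h | h | h | h | h | h | h | h | h | h <;> rw [hc _ h] <;> decide

-- A's elif chain is the first-match chain over the word table
theorem pvChainA (cs : List Char) (i : Int) (acc : List Char) :
    (if PySem.List.slice cs (some i) (some (i + 4)) = "zero".toList then acc ++ ['0']
     else if PySem.List.slice cs (some i) (some (i + 3)) = "one".toList then acc ++ ['1']
     else if PySem.List.slice cs (some i) (some (i + 3)) = "two".toList then acc ++ ['2']
     else if PySem.List.slice cs (some i) (some (i + 5)) = "three".toList then acc ++ ['3']
     else if PySem.List.slice cs (some i) (some (i + 4)) = "four".toList then acc ++ ['4']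
     else if PySem.List.slice cs (some i) (some (i + 4)) = "five".toList then acc ++ ['5']
     else if PySem.List.slice cs (some i) (some (i + 3)) = "six".toList then acc ++ ['6']
     else if PySem.List.slice cs (some i) (some (i + 5)) = "seven".toList then acc ++ ['7']
     else if PySem.List.slice cs (some i) (some (i + 5)) = "eight".toList then acc ++ ['8']
     else if PySem.List.slice cs (some i) (some (i + 4)) = "nine".toList then acc ++ ['9']
     else acc)
    = acc ++ pvFchain cs i pvWords := by
  have h0 : PySem.List.len ("zero".toList) = 4 := by decide
  have h1 : PySem.List.len ("one".toList) = 3 := by decide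
  have h2 : PySem.List.len ("two".toList) = 3 := by decide
  have h3 : PySem.List.len ("three".toList) = 5 := by decide
  have h4 : PySem.List.len ("four".toList) = 4 := by decide
  have h5 : PySem.List.len ("five".toList) = 4 := by decide
  have h6 : PySem.List.len ("six".toList) = 3 := by decide
  have h7 : PySem.List.len ("seven".toList) = 5 := by decide
  have h8 : PySem.List.len ("eight".toList) = 5 := by decide
  have h9 : PySem.List.len ("nine".toList) = 4 := by decide
  simp only [pvWords, pvFchain, h0, h1, h2, h3, h4, h5, h6, h7, h8, h9,
    apply_ite (fun l : List Char => acc ++ l), List.append_nil]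

-- ---- A's loop is the per-position emission, flattened ----
theorem pvA_flat (cs : List Char) :
    ((PySem.List.pyRange 0 (PySem.List.len cs) 1).foldl (fun acc i =>
      match PySem.List.pyGet? cs i with
      | none => acc
      | some c =>
        if c ∈ (['0', '1', '2', '3', '4', '5', '6', '7', '8', '9'] : List Char) then acc ++ [c]
        else if PySem.List.slice cs (some i) (some (i + 4)) = "zero".toList then acc ++ ['0']
        else if PySem.List.slice cs (some i) (some (i + 3)) = "one".toList then acc ++ ['1']
        else if PySem.List.slice cs (some i) (some (i + 3)) = "two".toList then acc ++ ['2']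
        else if PySem.List.slice cs (some i) (some (i + 5)) = "three".toList then acc ++ ['3']
        else if PySem.List.slice cs (some i) (some (i + 4)) = "four".toList then acc ++ ['4']
        else if PySem.List.slice cs (some i) (some (i + 4)) = "five".toList then acc ++ ['5']
        else if PySem.List.slice cs (some i) (some (i + 3)) = "six".toList then acc ++ ['6']
        else if PySem.List.slice cs (some i) (some (i + 5)) = "seven".toList then acc ++ ['7']
        else if PySem.List.slice cs (some i) (some (i + 5)) = "eight".toList then acc ++ ['8']
        else if PySem.List.slice cs (some i) (some (i + 4)) = "nine".toList then acc ++ ['9']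
        else acc) [])
      = (List.range cs.length).flatMap (pvEmit cs) := by
  rw [PySem.List.len_eq, PySem.List.pyRange_one]
  have hn : ((cs.length : Int) - 0).toNat = cs.length := by omega
  rw [hn, List.foldl_map]
  have h2 : List.foldl (fun acc (k : Nat) => acc ++ pvEmit cs k) [] (List.range cs.length)
      = (List.range cs.length).flatMap (pvEmit cs) := by
    rw [PySem.List.foldl_append_eq_flatMap, List.nil_append]
  rw [← h2]
  apply PySem.List.foldl_congr_mem
  intro acc k hk
  have hk' : k < cs.length := List.mem_range.mp hk
  have hget : PySem.List.pyGet? cs ((0 : Int) + (k : Int)) = some cs[k] := by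
    rw [zero_add, PySem.List.pyGet?_natCast, List.getElem?_eq_getElem hk']
  rw [hget]
  simp only [zero_add]
  rw [pvEmit, dif_pos hk']
  by_cases hd : '0' ≤ cs[k] ∧ cs[k] ≤ '9'
  · rw [if_pos hd]
    show (if _ ∈ _ then _ else _) = _
    rw [if_pos ((pvMem_intList _).mpr hd)]
  · rw [if_neg hd]
    show (if _ ∈ _ then _ else _) = _
    rw [if_neg (fun hmm => hd ((pvMem_intList _).mp hmm)), pvChainA]

-- ---- the find loop collects the match positions, in increasing order ----
theorem pvFilter_step (n k m : Nat) (P : Nat → Prop) [DecidablePred P]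
    (hm : m < n) (hPm : P m) (hkm : k ≤ m) (hmin : ∀ j, k ≤ j → j < m → ¬ P j) :
    (List.range n).filter (fun j => decide (k ≤ j ∧ P j))
      = m :: (List.range n).filter (fun j => decide (m + 1 ≤ j ∧ P j)) := by
  obtain ⟨d, rfl⟩ : ∃ d, n = (m + 1) + d := ⟨n - (m + 1), by omega⟩
  rw [List.range_add, List.filter_append, List.filter_append, List.range_succ,
    List.filter_append, List.filter_append]
  have hfront1 : (List.range m).filter (fun j => decide (k ≤ j ∧ P j)) = [] := by
    rw [List.filter_eq_nil_iff]
    intro j hj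
    have hjm := List.mem_range.mp hj
    simp only [decide_eq_true_eq, not_and]
    intro hkj
    exact hmin j hkj hjm
  have hfront2 : (List.range m).filter (fun j => decide (m + 1 ≤ j ∧ P j)) = [] := by
    rw [List.filter_eq_nil_iff]
    intro j hj
    have hjm := List.mem_range.mp hj
    simp only [decide_eq_true_eq, not_and]
    omega
  have hm1 : ([m] : List Nat).filter (fun j => decide (k ≤ j ∧ P j)) = [m] := by
    simp [hkm, hPm]
  have hm2 : ([m] : List Nat).filter (fun j => decide (m + 1 ≤ j ∧ P j)) = [] := by
    simp
  have htail : ((List.range d).map (fun x => m + 1 + x)).filter (fun j => decide (k ≤ j ∧ P j))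
      = ((List.range d).map (fun x => m + 1 + x)).filter (fun j => decide (m + 1 ≤ j ∧ P j)) := by
    apply List.filter_congr
    intro j hj
    obtain ⟨x, _, rfl⟩ := List.mem_map.mp hj
    have h1 : k ≤ m + 1 + x := by omega
    have h2 : m + 1 ≤ m + 1 + x := by omega
    simp [h1, h2]
  rw [hfront1, hfront2, hm1, hm2, htail]
  simp

theorem pvFindLoop_spec (cs w dstr : List Char) (hw : w ≠ []) :
    ∀ (fuel k : Nat), k ≤ cs.length → cs.length + 1 - k ≤ fuel → ∀ acc,
    pvFindLoop cs w dstr fuel (PySem.Chars.findFrom cs w (k : Int)) acc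
      = acc ++ ((List.range cs.length).filter (fun j => decide (k ≤ j ∧ w <+: cs.drop j))).map
          (fun (j : Nat) => ((j : Int), dstr)) := by
  intro fuel
  induction fuel with
  | zero => intro k hk hf; omega
  | succ fuel ih =>
    intro k hk hf acc
    by_cases hend : PySem.Chars.findFrom cs w (k : Int) = -1
    · rw [pvFindLoop, if_pos hend]
      have hnil : (List.range cs.length).filter (fun j => decide (k ≤ j ∧ w <+: cs.drop j)) = [] := by
        rw [List.filter_eq_nil_iff]
        intro j _
        simp only [decide_eq_true_eq, not_and]
        intro hkj hpre
        apply (PySem.Chars.findFrom_natCast_eq_neg_one_iff cs w k hk).mp hend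
        have hdd : cs.drop j = (cs.drop k).drop (j - k) := by
          rw [List.drop_drop]; congr 1; omega
        rw [hdd] at hpre
        exact hpre.isInfix.trans (List.drop_suffix _ _).isInfix
      rw [hnil]
      simp
    · obtain ⟨hkm, hpre, hmin⟩ := PySem.Chars.findFrom_natCast_spec cs w k hk hend
      set m := PySem.Chars.findFrom cs w (k : Int) with hmdef
      have hm0 : (0 : Int) ≤ m := le_trans (Int.natCast_nonneg k) hkm
      have hmlt : m.toNat < cs.length := by
        by_contra hge
        have hdn : cs.drop m.toNat = [] := List.drop_eq_nil_iff.mpr (by omega)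
        rw [hdn] at hpre
        exact hw (List.prefix_nil.mp hpre)
      rw [pvFindLoop, if_neg hend]
      have hcast : m + 1 = ((m.toNat + 1 : Nat) : Int) := by push_cast; omega
      have hkmN : k ≤ m.toNat := by omega
      rw [hcast, ih (m.toNat + 1) (by omega) (by omega) (acc ++ [(m, dstr)])]
      rw [pvFilter_step cs.length k m.toNat (fun j => w <+: cs.drop j) hmlt hpre hkmN hmin]
      rw [List.map_cons, List.append_assoc, List.singleton_append, Int.toNat_of_nonneg hm0]

-- the whole fold over the enumerated words appends the flatMap of occurrence lists
theorem pvWordFold (cs : List Char) (h0 : List (Int × List Char)) :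
    (PySem.List.enumerate pvWordsB 0).foldl
      (fun h dw => pvFindLoop cs dw.2 (PySem.Int.toChars dw.1) (cs.length + 1)
        (PySem.Chars.find cs dw.2) h) h0
      = h0 ++ (PySem.List.enumerate pvWordsB 0).flatMap (pvG cs) := by
  have h2 : List.foldl (fun h dw => h ++ pvG cs dw) h0 (PySem.List.enumerate pvWordsB 0)
      = h0 ++ (PySem.List.enumerate pvWordsB 0).flatMap (pvG cs) := by
    rw [PySem.List.foldl_append_eq_flatMap]
  rw [← h2]
  apply PySem.List.foldl_congr_mem
  intro h dw hdw
  have hw := pvEnum_ne dw hdw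
  have h0eq : PySem.Chars.find cs dw.2 = PySem.Chars.findFrom cs dw.2 ((0 : Nat) : Int) := by
    rw [Nat.cast_zero, PySem.Chars.findFrom_zero]
  rw [h0eq, pvFindLoop_spec cs dw.2 _ hw (cs.length + 1) 0 (Nat.zero_le _) (by omega) h]
  congr 2
  apply List.filter_congr
  intro j _
  simp

-- ---- the sorted hit list is the per-position emission list ----
theorem pvYs_pairwise (cs : List Char) : (pvYs cs).Pairwise (fun p q => p.1 < q.1) := by
  rw [pvYs, List.pairwise_filterMap]
  refine List.pairwise_lt_range.imp ?_
  intro a b hab p hp q hq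
  by_cases ha : pvEmit cs a = []
  · rw [if_pos ha] at hp; cases hp
  by_cases hb : pvEmit cs b = []
  · rw [if_pos hb] at hq; cases hq
  rw [if_neg ha] at hp
  rw [if_neg hb] at hq
  obtain rfl := Option.some_inj.mp hp
  obtain rfl := Option.some_inj.mp hq
  simpa using hab

theorem pvYs_nodup (cs : List Char) : (pvYs cs).Nodup := by
  refine (pvYs_pairwise cs).imp ?_
  intro a b h he
  rw [he] at h
  exact lt_irrefl _ h

theorem pvDH_nodup (cs : List Char) : (pvDH cs).Nodup := by
  have hp : (pvDH cs).Pairwise (fun p q => p.1 < q.1) := by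
    rw [pvDH, List.pairwise_map]
    exact List.Pairwise.sublist List.filter_sublist (PySem.List.pairwise_lt_enumerate cs 0)
  exact hp.imp (fun h he => by rw [he] at h; exact lt_irrefl _ h)

theorem pvG_nodup (cs : List Char) (dw : Int × List Char) : (pvG cs dw).Nodup := by
  have hp : (pvG cs dw).Pairwise (fun p q => p.1 < q.1) := by
    rw [pvG, List.pairwise_map]
    exact (List.Pairwise.sublist List.filter_sublist List.pairwise_lt_range).imp
      (fun h => by simpa using h)
  exact hp.imp (fun h he => by rw [he] at h; exact lt_irrefl _ h)

-- an element of pvG is a match position for that word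
theorem pvMem_pvG (cs : List Char) (dw : Int × List Char) (t : Int × List Char)
    (ht : t ∈ pvG cs dw) :
    ∃ j : Nat, j < cs.length ∧ dw.2 <+: cs.drop j ∧ t = ((j : Int), PySem.Int.toChars dw.1) := by
  rw [pvG, List.mem_map] at ht
  obtain ⟨j, hj, rfl⟩ := ht
  rw [List.mem_filter, List.mem_range] at hj
  exact ⟨j, hj.1, by simpa using hj.2, rfl⟩

theorem pvHits_nodup (cs : List Char) :
    (pvDH cs ++ (PySem.List.enumerate pvWordsB 0).flatMap (pvG cs)).Nodup := by
  refine List.Nodup.append (pvDH_nodup cs) ?_ ?_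
  · rw [List.nodup_flatMap]
    refine ⟨fun dw _ => pvG_nodup cs dw, ?_⟩
    refine List.Pairwise.imp_of_mem ?_ pvEnum_pf
    intro dw1 dw2 h1 h2 hne t ht1 ht2
    obtain ⟨j1, _, hp1, rfl⟩ := pvMem_pvG cs dw1 t ht1
    obtain ⟨j2, _, hp2, heq⟩ := pvMem_pvG cs dw2 _ ht2
    have hj : j1 = j2 := by
      have := congrArg Prod.fst heq
      simpa using this
    subst hj
    rcases List.prefix_or_prefix_of_prefix hp1 hp2 with h | h
    · exact hne.1 h
    · exact hne.2 h
  · intro t htD htF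
    rw [pvDH, List.mem_map] at htD
    obtain ⟨p, hp, rfl⟩ := htD
    rw [List.mem_filter] at hp
    obtain ⟨hpe, hdig⟩ := hp
    rw [PySem.List.mem_enumerate_iff] at hpe
    obtain ⟨a, ha, rfl⟩ := hpe
    rw [List.mem_flatMap] at htF
    obtain ⟨dw, hdw, htG⟩ := htF
    obtain ⟨j, hj, hpre, heq⟩ := pvMem_pvG cs dw _ htG
    have hja : j = a := by
      have := congrArg Prod.fst heq
      simp at this
      omega
    subst hja
    have hhead := (pvPrefix_head cs dw.2 j (pvEnum_ne dw hdw) hpre).2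
    obtain ⟨ch, tl, hwe⟩ := List.exists_cons_of_ne_nil (pvEnum_ne dw hdw)
    rw [List.getElem?_eq_getElem ha, hwe] at hhead
    simp only [List.head?_cons, Option.some_inj] at hhead
    have hnd := pvEnum_head dw hdw
    rw [hwe] at hnd
    simp only [List.headD_cons] at hnd
    rw [← hhead] at hnd
    simp only [decide_eq_true_eq] at hdig
    exact hnd hdig

theorem pvMem_hits (cs : List Char) (t : Int × List Char) :
    t ∈ pvDH cs ++ (PySem.List.enumerate pvWordsB 0).flatMap (pvG cs) ↔ t ∈ pvYs cs := by
  constructor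
  · intro ht
    rcases List.mem_append.mp ht with hD | hW
    · rw [pvDH, List.mem_map] at hD
      obtain ⟨p, hp, rfl⟩ := hD
      rw [List.mem_filter] at hp
      obtain ⟨hpe, hdig⟩ := hp
      rw [PySem.List.mem_enumerate_iff] at hpe
      obtain ⟨a, ha, rfl⟩ := hpe
      simp only [decide_eq_true_eq] at hdig
      have he : pvEmit cs a = [cs[a]] := by rw [pvEmit, dif_pos ha, if_pos hdig]
      rw [pvYs, List.mem_filterMap]
      refine ⟨a, List.mem_range.mpr ha, ?_⟩
      rw [he, if_neg (by simp)]
      simp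
    · rw [List.mem_flatMap] at hW
      obtain ⟨dw, hdw, htG⟩ := hW
      obtain ⟨j, hj, hpre, rfl⟩ := pvMem_pvG cs dw t htG
      have hw := pvEnum_ne dw hdw
      have hhead := (pvPrefix_head cs dw.2 j hw hpre).2
      obtain ⟨ch, tl, hwe⟩ := List.exists_cons_of_ne_nil hw
      rw [List.getElem?_eq_getElem hj, hwe] at hhead
      simp only [List.head?_cons, Option.some_inj] at hhead
      have hnd : ¬('0' ≤ cs[j] ∧ cs[j] ≤ '9') := by
        have := pvEnum_head dw hdw
        rw [hwe] at this
        simp only [List.headD_cons] at this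
        rw [hhead]; exact this
      have hwd : (dw.2, PySem.Int.toChars dw.1) ∈ pvWords := by
        rw [← pvEnum_map]
        exact List.mem_map_of_mem hdw
      have hm : PySem.List.slice cs (some (j : Int)) (some ((j : Int) + PySem.List.len dw.2)) = dw.2 := by
        rw [pvSlice_match_iff cs (j : Int) (Int.natCast_nonneg j) dw.2]
        simpa using hpre
      have hfc : pvFchain cs (j : Int) pvWords = PySem.Int.toChars dw.1 := by
        have := pvFchain_eq_of_match cs (j : Int) pvWords
          (pvPairwise_at cs (j : Int) (Int.natCast_nonneg j))
          (dw.2, PySem.Int.toChars dw.1) hwd hm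
        simpa using this
      have he : pvEmit cs j = PySem.Int.toChars dw.1 := by
        rw [pvEmit, dif_pos hj, if_neg hnd, hfc]
      rw [pvYs, List.mem_filterMap]
      refine ⟨j, List.mem_range.mpr hj, ?_⟩
      rw [he, if_neg (pvEnum_dstr_ne dw hdw)]
  · intro ht
    rw [pvYs, List.mem_filterMap] at ht
    obtain ⟨k, hkr, hf⟩ := ht
    have hk := List.mem_range.mp hkr
    by_cases hne : pvEmit cs k = []
    · rw [if_pos hne] at hf; cases hf
    rw [if_neg hne] at hf
    obtain rfl : t = ((k : Int), pvEmit cs k) := (Option.some_inj.mp hf).symm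
    by_cases hdig : '0' ≤ cs[k] ∧ cs[k] ≤ '9'
    · have he : pvEmit cs k = [cs[k]] := by rw [pvEmit, dif_pos hk, if_pos hdig]
      apply List.mem_append_left
      rw [pvDH, List.mem_map]
      refine ⟨((0 : Int) + (k : Int), cs[k]), ?_, by simp [he]⟩
      rw [List.mem_filter]
      refine ⟨?_, by simpa using hdig⟩
      rw [PySem.List.mem_enumerate_iff]
      exact ⟨k, hk, rfl⟩
    · have he : pvEmit cs k = pvFchain cs (k : Int) pvWords := by
        rw [pvEmit, dif_pos hk, if_neg hdig]
      rw [he] at hne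
      obtain ⟨wd, hwd, hm, hfc⟩ := pvFchain_ne_nil_exists cs (k : Int) pvWords hne
      rw [← pvEnum_map, List.mem_map] at hwd
      obtain ⟨dw, hdw, hdweq⟩ := hwd
      apply List.mem_append_right
      rw [List.mem_flatMap]
      refine ⟨dw, hdw, ?_⟩
      rw [pvG, List.mem_map]
      refine ⟨k, ?_, ?_⟩
      · rw [List.mem_filter, List.mem_range]
        refine ⟨hk, ?_⟩
        have hpre : dw.2 <+: cs.drop k := by
          have := (pvSlice_match_iff cs (k : Int) (Int.natCast_nonneg k) wd.1).mp hm
          rw [← hdweq] at this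
          simpa using this
        simpa using hpre
      · have hv : PySem.Int.toChars dw.1 = wd.2 := by rw [← hdweq]
        rw [he, hfc, hv]
-- ---- joining ----
theorem pvFlat_filterMap (g : Nat → List Char) (l : List Nat) :
    (l.filterMap (fun k => if g k = [] then none else some ((k : Int), g k))).flatMap
      (fun t => t.2) = l.flatMap g := by
  induction l with
  | nil => rfl
  | cons k l ih =>
    by_cases hk : g k = []
    · simp [hk, ih]
    · simp [hk, ih]

theorem pvB_flat (cs : List Char) :
    ((PySem.List.sorted
        ((PySem.List.enumerate pvWordsB 0).foldl
          (fun h dw => pvFindLoop cs dw.2 (PySem.Int.toChars dw.1) (cs.length + 1)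
            (PySem.Chars.find cs dw.2) h)
          ((PySem.List.enumerate cs 0).foldl
            (fun h p => if '0' ≤ p.2 ∧ p.2 ≤ '9' then h ++ [(p.1, [p.2])] else h) []))
        (fun t => t.1)).foldl (fun acc t => acc ++ t.2) [])
      = (List.range cs.length).flatMap (pvEmit cs) := by
  have h0 : (PySem.List.enumerate cs 0).foldl
      (fun h p => if '0' ≤ p.2 ∧ p.2 ≤ '9' then h ++ [(p.1, [p.2])] else h) [] = pvDH cs := by
    rw [PySem.List.foldl_append_ite (p := fun p : Int × Char => '0' ≤ p.2 ∧ p.2 ≤ '9')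
      (f := fun p : Int × Char => (p.1, ([p.2] : List Char)))]
    rw [List.nil_append, pvDH]
  rw [h0, pvWordFold cs (pvDH cs)]
  have hperm : (pvYs cs).Perm (pvDH cs ++ (PySem.List.enumerate pvWordsB 0).flatMap (pvG cs)) :=
    (List.perm_ext_iff_of_nodup (pvYs_nodup cs) (pvHits_nodup cs)).mpr
      (fun t => (pvMem_hits cs t).symm)
  rw [PySem.List.sorted_eq_of_perm_of_pairwise_lt _ (pvYs cs) (fun t => t.1) hperm
    (pvYs_pairwise cs)]
  rw [PySem.List.foldl_append_eq_flatMap, List.nil_append, pvYs, pvFlat_filterMap]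

theorem solution_total_eq (s : String) : solution s = solution_alt s := by
  simp only [solution, solution_alt]
  rw [pvA_flat s.toList, pvB_flat s.toList]

-- ===== VERDICT (by name: the statement is the Claim_ definition above) =====
theorem solution_spec : Claim_equal_solution := by
  intro s _ _
  exact solution_total_eq s
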